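-- pv_equiv track=rewrite | github.com/RJJZitman/advent_of_code | 2024/day1/main.py | calc_sim_score
-- ===== SOURCE A (Python) =====
-- def calc_sim_score(l1: list[int], l2: list[int]) -> int:
--     """
--     Calculates a similarity score for entries of two lists of equal length. The score is calculated
--     by "adding up each number in the left list after multiplying it by the number of times that
--     number appears in the right list".
--
--     Value counts are computed to reduce the number of lookups of l1 values in list 2. It also allows
--     for a single calculation per unique value in 1.
--
--     :param l1: first list used in calculation.
--     :param l2: second list used in calculation.
--     :return: similarity score
--     """
--     # Compute value counts
--     value_counts_l1 = {x:l1.count(x) for x in l1}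
--     value_counts_l2 = {x:l2.count(x) for x in l2}
--
--     # Calculate the sim score
--     return sum([loc_id * value_counts_l2[loc_id] * nb_occ
--                     if loc_id in value_counts_l2
--                     else 0
--                 for loc_id, nb_occ in value_counts_l1.items()]
--                 )
-- ===== SOURCE B (Python) =====
-- def calc_sim_score(l1: list[int], l2: list[int]) -> int:
--     return sum(v * l2.count(v) for v in l1)
-- ===== Notes on version B (the rewrite author's own statement) =====
-- stated objective: simpler
-- what changed: B drops both precomputed value-count dictionaries and the unique-key iteration; it scans l1 directly and counts each element's occurrences in l2 on the fly, using the identity that summing v*count1(v)*count2(v) over unique v equals summing v*count2(v) over all of l1.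
import Mathlib
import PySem

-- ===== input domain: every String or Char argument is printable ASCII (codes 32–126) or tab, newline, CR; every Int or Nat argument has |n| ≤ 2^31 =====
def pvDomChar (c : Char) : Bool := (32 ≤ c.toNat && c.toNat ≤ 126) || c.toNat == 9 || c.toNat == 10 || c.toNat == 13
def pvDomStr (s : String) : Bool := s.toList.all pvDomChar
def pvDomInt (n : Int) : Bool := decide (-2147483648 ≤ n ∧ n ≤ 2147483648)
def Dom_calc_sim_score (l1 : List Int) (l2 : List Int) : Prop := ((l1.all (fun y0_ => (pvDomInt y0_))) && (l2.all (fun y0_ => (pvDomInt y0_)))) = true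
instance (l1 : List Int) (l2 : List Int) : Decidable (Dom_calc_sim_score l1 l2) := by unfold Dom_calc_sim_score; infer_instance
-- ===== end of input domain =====

-- B drops the two precomputed value-count dictionaries and sums v * l2.count(v) directly over l1 (simpler; not faster).

-- ===== PORT A =====
-- {x: l.count(x) for x in l}: insertion loop into a dict (overwrite keeps position)
def pvValueCounts (l : List Int) : PySem.Dict Int Int :=
  l.foldl (fun d x => d.insert x ((l.count x : Int))) PySem.Dict.empty

def calc_sim_score (l1 : List Int) (l2 : List Int) : Int :=
  ((pvValueCounts l1).items.map (fun p =>
    if (pvValueCounts l2).contains p.1 then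
      p.1 * ((pvValueCounts l2).getD p.1 0) * p.2
    else 0)).sum

-- ===== PORT B =====
def calc_sim_score_alt (l1 : List Int) (l2 : List Int) : Int :=
  (l1.map (fun v => v * (l2.count v : Int))).sum

-- ===== PRECONDITION & SPEC =====
def Spec_calc_sim_score (l1 : List Int) (l2 : List Int) (out : Int) : Prop := out = calc_sim_score_alt l1 l2
instance (l1 : List Int) (l2 : List Int) (out : Int) : Decidable (Spec_calc_sim_score l1 l2 out) := by unfold Spec_calc_sim_score; infer_instance

-- ===== CLAIM (what is proved, stated in full; the proofs are below) =====
def Claim_equal_calc_sim_score : Prop := ∀ (l1 : List Int) (l2 : List Int), Dom_calc_sim_score l1 l2 → Spec_calc_sim_score l1 l2 (calc_sim_score l1 l2)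

-- ===== LEMMAS AND PROOFS =====

-- lookup in the comprehension dict: last insert wins, and every insert at x stores l.count x
lemma getD_foldl_insert_fun (f : Int → Int) (l : List Int) (d : PySem.Dict Int Int) (v : Int) :
    (l.foldl (fun d x => d.insert x (f x)) d).getD v 0 =
      if v ∈ l then f v else d.getD v 0 := by
  induction l generalizing d with
  | nil => simp
  | cons a t ih =>
    simp only [List.foldl_cons, ih, PySem.Dict.getD_insert, List.mem_cons]
    by_cases hv : v ∈ t
    · simp [hv]
    · by_cases hva : v = a <;> simp [hv, hva]

lemma keys_valueCounts (l : List Int) : (pvValueCounts l).keys = PySem.List.dedup l := by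
  unfold pvValueCounts
  rw [PySem.Dict.keys_foldl_insert]
  simp [PySem.Set.update_nil_left, PySem.List.dedup_eq_ofList, PySem.Dict.keys_empty]

lemma nodup_keys_valueCounts (l : List Int) : (pvValueCounts l).keys.Nodup := by
  rw [keys_valueCounts]; exact PySem.List.nodup_dedup l

lemma getD_valueCounts (l : List Int) (v : Int) :
    (pvValueCounts l).getD v 0 = if v ∈ l then (l.count v : Int) else 0 := by
  unfold pvValueCounts
  rw [getD_foldl_insert_fun (fun x => (l.count x : Int))]
  simp

lemma contains_valueCounts (l : List Int) (v : Int) :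
    (pvValueCounts l).contains v = decide (v ∈ l) := by
  rw [PySem.Dict.contains_eq_decide_mem_keys, keys_valueCounts]
  simp

lemma items_valueCounts (l : List Int) :
    (pvValueCounts l).items = (PySem.List.dedup l).map (fun k => (k, (l.count k : Int))) := by
  rw [PySem.Dict.items_eq_map_keys _ (nodup_keys_valueCounts l) 0, keys_valueCounts]
  apply List.map_congr_left
  intro k hk
  have hk' : k ∈ l := by simpa using hk
  simp [getD_valueCounts, hk']

-- ∑_{x ∈ dedup l} g x * count l x = ∑_{v ∈ l} g v
lemma sum_dedup_count (l : List Int) (g : Int → Int) :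
    ((PySem.List.dedup l).map (fun x => g x * (l.count x : Int))).sum = (l.map g).sum := by
  have hnd : (PySem.List.dedup l).Nodup := PySem.List.nodup_dedup l
  have htf : (PySem.List.dedup l).toFinset = l.toFinset := by
    ext x; simp
  rw [← List.sum_toFinset _ hnd, htf]
  have h2 : (l.map g).sum = ∑ x ∈ l.toFinset, l.count x • g x := by
    simpa using Finset.sum_multiset_map_count (l : Multiset Int) g
  rw [h2]
  apply Finset.sum_congr rfl
  intro x _
  simp [mul_comm]

-- ===== VERDICT (by name: the statement is the Claim_ definition above) =====
theorem calc_sim_score_spec : Claim_equal_calc_sim_score := by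
  intro l1 l2 _
  unfold Spec_calc_sim_score calc_sim_score calc_sim_score_alt
  rw [items_valueCounts, List.map_map]
  have hmap : ((PySem.List.dedup l1).map
      ((fun p : Int × Int =>
          if (pvValueCounts l2).contains p.1 then p.1 * ((pvValueCounts l2).getD p.1 0) * p.2 else 0) ∘
        (fun k => (k, (l1.count k : Int))))) =
      (PySem.List.dedup l1).map (fun x => (x * (l2.count x : Int)) * (l1.count x : Int)) := by
    apply List.map_congr_left
    intro k _
    simp only [Function.comp, contains_valueCounts, getD_valueCounts]
    by_cases h2 : k ∈ l2
    · simp [h2, mul_assoc]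
    · simp [h2, List.count_eq_zero_of_not_mem h2]
  rw [hmap, sum_dedup_count l1 (fun x => x * (l2.count x : Int))]
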